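-- pv_equiv track=rewrite | github.com/hry8310/ai | ml/adaboost/classifer.py | _e_min
-- ===== SOURCE A (Python) =====
-- def _e_min(x):
--     ret=10000
--     for i in range(len(x)):
--         temp=min(x[i])
--         if ret>temp :
--             ret=temp
--
--     for i in range(len(x)):
--         if ret==min(x[i]):
--             return ret,i,x[i].index(ret)
-- ===== SOURCE B (Python) =====
-- def _e_min(x):
--     best = None
--     for i, row in enumerate(x):
--         m = min(row)
--         if best is None or m < best[0]:
--             best = (m, i, row.index(m))
--     return best
-- ===== Notes on version B (the rewrite author's own statement) =====
-- stated objective: simpler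
-- what changed: A single pass maintaining best = (min, row, col) replaces A's two separate scans (global-min pass, then a second pass re-computing each row's min and calling .index); Pre_ excludes inputs where A returns None instead of a triple (empty list, or every element above A's 10000 sentinel initialisation) and empty rows where min() raises.
-- outside the precondition, e.g. on _e_min([]): A returns None, B returns None; on _e_min([[20000]]): A returns None, B returns (20000, 0, 0)
import Mathlib
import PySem

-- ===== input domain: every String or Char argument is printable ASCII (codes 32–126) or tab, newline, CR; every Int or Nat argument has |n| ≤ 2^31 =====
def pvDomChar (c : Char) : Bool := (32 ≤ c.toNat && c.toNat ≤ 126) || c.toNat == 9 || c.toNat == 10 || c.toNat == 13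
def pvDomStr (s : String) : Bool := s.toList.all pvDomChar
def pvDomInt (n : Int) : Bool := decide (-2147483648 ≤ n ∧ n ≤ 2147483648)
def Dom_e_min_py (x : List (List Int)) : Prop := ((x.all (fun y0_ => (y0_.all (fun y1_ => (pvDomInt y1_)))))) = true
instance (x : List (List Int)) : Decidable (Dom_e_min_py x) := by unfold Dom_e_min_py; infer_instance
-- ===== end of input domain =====

-- B is one maintained-best pass instead of A's two scans (global-min pass, then a rescan
-- locating the row and column); objective: simpler. Equivalence is proved on inputs where
-- A returns a triple (Pre_: no empty row, and some element ≤ 10000).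

-- ===== PORT A =====
-- one step of A's first loop: temp = min(x[i]); if ret > temp: ret = temp
def e_min_stepA (r : Int) (row : List Int) : Int :=
  match PySem.List.min? row (fun v => v) with
  | some temp => if r > temp then temp else r
  | none => r      -- Python raises ValueError here (empty row); excluded by Pre_

-- A's second loop: first i with ret == min(x[i]), returning (ret, i, x[i].index(ret))
def e_min_goA (ret : Int) : List (List Int) → Int → Int × Int × Int
  | [], _ => (0, 0, 0)   -- Python falls off the loop and returns None; excluded by Pre_
  | row :: rest, i =>
    if PySem.List.min? row (fun v => v) = some ret then
      (ret, i, (((PySem.List.index? row ret).getD 0 : Nat) : Int))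
    else e_min_goA ret rest (i + 1)

def e_min_py (x : List (List Int)) : Int × Int × Int :=
  e_min_goA (x.foldl e_min_stepA 10000) x 0

-- ===== PORT B =====
-- one step of B's single pass: m = min(row); if best is None or m < best[0]: best = (m, i, row.index(m))
def e_min_stepB (s : Option (Int × Int × Int) × Int) (row : List Int) :
    Option (Int × Int × Int) × Int :=
  match PySem.List.min? row (fun v => v) with
  | none => s      -- Python raises ValueError here (empty row); excluded by Pre_
  | some m =>
    match s.1 with
    | none => (some (m, s.2, (((PySem.List.index? row m).getD 0 : Nat) : Int)), s.2 + 1)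
    | some b =>
      if m < b.1 then (some (m, s.2, (((PySem.List.index? row m).getD 0 : Nat) : Int)), s.2 + 1)
      else (some b, s.2 + 1)

def e_min_py_alt (x : List (List Int)) : Int × Int × Int :=
  match (x.foldl e_min_stepB (none, 0)).1 with
  | none => (0, 0, 0)      -- Python returns None (empty x); excluded by Pre_
  | some b => b

-- ===== PRECONDITION & SPEC =====
-- Pre_ excludes inputs where Python A does not return a triple of ints: an empty row makes
-- min() raise ValueError, and an empty list or a global minimum above A's 10000 sentinel
-- initialisation makes A return None (not a value of the declared type).
def Pre_e_min_py (x : List (List Int)) : Prop :=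
  (∀ r ∈ x, r ≠ []) ∧ (∃ r ∈ x, ∃ v ∈ r, v ≤ 10000)
instance (x : List (List Int)) : Decidable (Pre_e_min_py x) := by unfold Pre_e_min_py; infer_instance

def pvWitness_e_min_py : List (List Int) := [[3, 1], [2]]

def Spec_e_min_py (x : List (List Int)) (out : Int × Int × Int) : Prop := out = e_min_py_alt x
instance (x : List (List Int)) (out : Int × Int × Int) : Decidable (Spec_e_min_py x out) := by unfold Spec_e_min_py; infer_instance

-- ===== CLAIM (what is proved, stated in full; the proofs are below) =====
def Claim_equal_e_min_py : Prop := ∀ (x : List (List Int)), Dom_e_min_py x → Pre_e_min_py x → Spec_e_min_py x (e_min_py x)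

-- ===== LEMMAS AND PROOFS =====

-- proof-side reference: the best (min value, row index, column index) of a suffix, first row wins ties
def pvCombine (a b : Option (Int × Int × Int)) : Option (Int × Int × Int) :=
  match a, b with
  | a, none => a
  | none, b => b
  | some a, some b => if b.1 < a.1 then some b else some a

def pvBestOf : List (List Int) → Int → Option (Int × Int × Int)
  | [], _ => none
  | row :: rest, i =>
    let m := (PySem.List.min? row (fun v => v)).getD 0
    pvCombine (some (m, i, (((PySem.List.index? row m).getD 0 : Nat) : Int)))
              (pvBestOf rest (i + 1))

theorem pvCombine_assoc (a b c : Option (Int × Int × Int)) :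
    pvCombine (pvCombine a b) c = pvCombine a (pvCombine b c) := by
  rcases a with _ | a <;> rcases b with _ | b <;> rcases c with _ | c <;>
    simp only [pvCombine] <;> (try split_ifs) <;> (try simp only [pvCombine]) <;>
    (try split_ifs) <;> first | rfl | omega

theorem min?_of_ne_nil {row : List Int} (h : row ≠ []) :
    PySem.List.min? row (fun v => v) = some ((PySem.List.min? row (fun v => v)).getD 0) := by
  rcases hm : PySem.List.min? row (fun v => v) with _ | m
  · exact absurd ((PySem.List.min?_eq_none_iff (key := fun v => v) (xs := row)).1 hm) h
  · rfl

theorem stepB_eq {s : Option (Int × Int × Int) × Int} {row : List Int} (h : row ≠ []) :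
    e_min_stepB s row =
      (pvCombine s.1 (some (((PySem.List.min? row (fun v => v)).getD 0), s.2,
        (((PySem.List.index? row ((PySem.List.min? row (fun v => v)).getD 0)).getD 0 : Nat) : Int))),
       s.2 + 1) := by
  unfold e_min_stepB
  rw [min?_of_ne_nil h]
  rcases s with ⟨_ | b, i⟩ <;> (simp only [pvCombine, Option.getD_some]; (try split_ifs)) <;> rfl

theorem foldB_eq (xs : List (List Int)) :
    ∀ (s : Option (Int × Int × Int) × Int), (∀ r ∈ xs, r ≠ []) →
    (xs.foldl e_min_stepB s).1 = pvCombine s.1 (pvBestOf xs s.2) := by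
  induction xs with
  | nil => intro s _; simp [pvBestOf, pvCombine]
  | cons row rest ih =>
    intro s hne
    have hrow : row ≠ [] := hne row (by simp)
    simp only [List.foldl_cons]
    rw [ih _ (fun r hr => hne r (by simp [hr])), stepB_eq hrow]
    simp only [pvBestOf]
    rw [pvCombine_assoc]

theorem foldA_eq (xs : List (List Int)) :
    ∀ (c i : Int), (∀ r ∈ xs, r ≠ []) →
    xs.foldl e_min_stepA c =
      (match pvBestOf xs i with
       | none => c
       | some b => min c b.1) := by
  induction xs with
  | nil => intro c i _; simp [pvBestOf]
  | cons row rest ih =>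
    intro c i hne
    have hrow : row ≠ [] := hne row (by simp)
    simp only [List.foldl_cons]
    rw [ih _ (i + 1) (fun r hr => hne r (by simp [hr]))]
    obtain ⟨m, hm⟩ : ∃ m, PySem.List.min? row (fun v => v) = some m :=
      ⟨_, min?_of_ne_nil hrow⟩
    simp only [pvBestOf, e_min_stepA, hm, Option.getD_some]
    rcases h : pvBestOf rest (i + 1) with _ | b <;>
      simp only [pvCombine] <;> split_ifs <;> simp [min_def] <;> (try split_ifs) <;> omega

theorem goA_eq (xs : List (List Int)) :
    ∀ (i : Int) (b : Int × Int × Int), (∀ r ∈ xs, r ≠ []) →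
    pvBestOf xs i = some b → e_min_goA b.1 xs i = b := by
  induction xs with
  | nil => intro i b _ h; simp [pvBestOf] at h
  | cons row rest ih =>
    intro i b hne hb
    have hrow : row ≠ [] := hne row (by simp)
    have hrest : ∀ r ∈ rest, r ≠ [] := fun r hr => hne r (by simp [hr])
    simp only [pvBestOf] at hb
    rcases h : pvBestOf rest (i + 1) with _ | r <;> rw [h] at hb
    · simp only [pvCombine, Option.some.injEq] at hb
      subst hb
      simp only [e_min_goA]
      rw [min?_of_ne_nil hrow]
      simp
    · simp only [pvCombine] at hb
      split_ifs at hb with hlt <;> simp only [Option.some.injEq] at hb <;> subst hb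
      · -- rest's best wins strictly: current row's min differs from b.1
        simp only [e_min_goA]
        rw [min?_of_ne_nil hrow]
        rw [if_neg (by simp; omega)]
        exact ih _ _ hrest h
      · simp only [e_min_goA]
        rw [min?_of_ne_nil hrow]
        simp

theorem bestOf_isSome (xs : List (List Int)) (i : Int) (h : xs ≠ []) :
    ∃ b, pvBestOf xs i = some b := by
  rcases xs with _ | ⟨row, rest⟩
  · exact absurd rfl h
  · simp only [pvBestOf]
    rcases pvBestOf rest (i + 1) with _ | s <;> simp only [pvCombine]
    · exact ⟨_, rfl⟩
    · split_ifs <;> exact ⟨_, rfl⟩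

theorem bestOf_isMin (xs : List (List Int)) :
    ∀ (i : Int) (b : Int × Int × Int), pvBestOf xs i = some b →
    ∀ r ∈ xs, ∀ v ∈ r, b.1 ≤ v := by
  induction xs with
  | nil => intro i b h; simp [pvBestOf] at h
  | cons row rest ih =>
    intro i b hb r hrmem v hv
    simp only [pvBestOf] at hb
    have hm0 : ∀ w ∈ row, ((PySem.List.min? row (fun v => v)).getD 0) ≤ w := by
      intro w hw
      rcases hmin : PySem.List.min? row (fun v => v) with _ | m
      · have := (PySem.List.min?_eq_none_iff (key := fun v => v) (xs := row)).1 hmin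
        subst this; simp at hw
      · simpa [hmin] using PySem.List.min?_isMin (key := fun v => v) hmin w hw
    rcases List.mem_cons.1 hrmem with hcur | hrest
    · subst hcur
      rcases h : pvBestOf rest (i + 1) with _ | s <;> rw [h] at hb <;>
        simp only [pvCombine] at hb
      · cases hb; exact hm0 v hv
      · split_ifs at hb with hlt <;> cases hb
        · exact le_trans (le_of_lt hlt) (hm0 v hv)
        · exact hm0 v hv
    · rcases h : pvBestOf rest (i + 1) with _ | s <;> rw [h] at hb <;>
        simp only [pvCombine] at hb
      · rcases rest with _ | ⟨r0, rest'⟩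
        · simp at hrest
        · obtain ⟨t, ht⟩ := bestOf_isSome (r0 :: rest') (i + 1) (by simp)
          rw [h] at ht; simp at ht
      · have hs := ih (i + 1) s h r hrest v hv
        split_ifs at hb with hlt <;> cases hb
        · exact hs
        · exact le_trans (by omega) hs

-- ===== VERDICT (by name: the statement is the Claim_ definition above) =====
theorem e_min_py_spec : Claim_equal_e_min_py := by
  intro x _ hpre
  rcases hpre with ⟨hne, r, hr, v, hv, hv10⟩
  have hx : x ≠ [] := by rintro rfl; simp at hr
  obtain ⟨b, hb⟩ := bestOf_isSome x 0 hx
  have hble : b.1 ≤ 10000 := le_trans (bestOf_isMin x 0 b hb r hr v hv) hv10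
  unfold Spec_e_min_py e_min_py e_min_py_alt
  rw [foldA_eq x 10000 0 hne, foldB_eq x (none, 0) hne, hb]
  simp only [pvCombine]
  have : min 10000 b.1 = b.1 := by omega
  rw [this]
  exact goA_eq x 0 b hne hb
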